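-- pv_equiv track=rewrite | github.com/QuestMerchant/silent-night | backend/voting.py | get_leading_vote
-- ===== SOURCE A (Python) =====
-- from typing import Optional
--
-- def get_leading_vote(votes: dict) -> Optional[str]:
--     """Returns username with most votes, None if tie or no votes"""
--     if not votes:
--         return None
--
--     highest_vote_count = max(votes.values())
--
--     if highest_vote_count == 0:
--         return None
--
--     leading_vote = [username for username, count in votes.items() if count == highest_vote_count]
--     if len(leading_vote) == 1:
--         return leading_vote[0]
--     return None # Ties return none
-- ===== SOURCE B (Python) =====
-- from typing import Optional
--
-- def get_leading_vote(votes: dict) -> Optional[str]: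
--     """Single pass: maintain the running best count, its first user, and a uniqueness flag."""
--     best_count = None
--     best_user = None
--     unique = True
--     for user, count in votes.items():
--         if best_count is None or count > best_count:
--             best_count = count
--             best_user = user
--             unique = True
--         elif count == best_count:
--             unique = False
--     if best_count is None or best_count == 0:
--         return None
--     return best_user if unique else None
-- ===== Notes on version B (the rewrite author's own statement) =====
-- stated objective: alternative
-- what changed: Replaces the two-pass max()-then-filter-and-count with a single pass over votes.items() keeping the running maximum, its first user and a uniqueness flag.
import Mathlib
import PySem

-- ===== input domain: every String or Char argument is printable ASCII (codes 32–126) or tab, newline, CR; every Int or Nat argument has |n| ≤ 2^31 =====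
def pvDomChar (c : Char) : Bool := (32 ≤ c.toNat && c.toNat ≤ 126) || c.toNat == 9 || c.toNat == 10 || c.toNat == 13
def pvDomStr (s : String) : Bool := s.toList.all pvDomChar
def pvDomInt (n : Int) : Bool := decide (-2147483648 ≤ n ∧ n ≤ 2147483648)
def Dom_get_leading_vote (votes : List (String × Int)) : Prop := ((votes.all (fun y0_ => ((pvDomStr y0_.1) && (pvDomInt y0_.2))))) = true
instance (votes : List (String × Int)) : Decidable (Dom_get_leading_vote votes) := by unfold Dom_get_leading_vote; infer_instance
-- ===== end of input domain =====

-- B replaces A's two passes (max, then filter-and-count) by one pass keeping the running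
-- maximum, its first user and a uniqueness flag; same results, alternative decomposition.

-- ===== PORT A =====
def get_leading_vote (votes : List (String × Int)) : Option String :=
  if votes = [] then none
  else
    match PySem.List.max? (votes.map Prod.snd) (fun x => x) with
    | none => none
    | some highest =>
      if highest = 0 then none
      else
        let leading := (votes.filter (fun p => p.2 == highest)).map Prod.fst
        if leading.length = 1 then PySem.List.pyGet? leading 0 else none

-- ===== PORT B =====
-- one loop step of B: state = (best_count, best_user, unique)
def bStep (s : Option Int × Option String × Bool) (p : String × Int) :
    Option Int × Option String × Bool :=
  match s with
  | (none, _, _) => (some p.2, some p.1, true)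
  | (some c, u, b) =>
    if p.2 > c then (some p.2, some p.1, true)
    else if p.2 == c then (some c, u, false)
    else (some c, u, b)

def get_leading_vote_alt (votes : List (String × Int)) : Option String :=
  match votes.foldl bStep (none, none, true) with
  | (none, _, _) => none
  | (some c, u, b) => if c = 0 then none else if b then u else none

-- ===== PRECONDITION & SPEC =====
def Spec_get_leading_vote (votes : List (String × Int)) (out : Option String) : Prop := out = get_leading_vote_alt votes
instance (votes : List (String × Int)) (out : Option String) : Decidable (Spec_get_leading_vote votes out) := by unfold Spec_get_leading_vote; infer_instance

-- ===== CLAIM (what is proved, stated in full; the proofs are below) =====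
def Claim_equal_get_leading_vote : Prop := ∀ (votes : List (String × Int)), Dom_get_leading_vote votes → Spec_get_leading_vote votes (get_leading_vote votes)

-- ===== LEMMAS AND PROOFS =====

-- proof-only recursive view of B's loop once best_count is set
def runAux : List (String × Int) → Int → String → Bool → Int × String × Bool
  | [], c, u, b => (c, u, b)
  | p :: l, c, u, b =>
    if p.2 > c then runAux l p.2 p.1 true
    else if p.2 == c then runAux l c u false
    else runAux l c u b

theorem foldl_bStep_eq_runAux (l : List (String × Int)) (c : Int) (u : String) (b : Bool) :
    l.foldl bStep (some c, some u, b) =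
      (some (runAux l c u b).1, some (runAux l c u b).2.1, (runAux l c u b).2.2) := by
  induction l generalizing c u b with
  | nil => simp [runAux]
  | cons p l ih =>
    simp only [List.foldl_cons, bStep, runAux]
    split_ifs with h1 h2
    · exact ih _ _ _
    · exact ih _ _ _
    · exact ih _ _ _

theorem runAux_spec (l : List (String × Int)) (c : Int) (u : String) (b : Bool) :
    runAux l c u b =
      (let M := (l.map Prod.snd).foldl max c;
       (M,
        if M = c then u else (((l.find? (fun p => p.2 == M)).map Prod.fst).getD u),
        if M = c then b && decide ((l.map Prod.snd).count c = 0)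
        else decide ((l.map Prod.snd).count M = 1))) := by
  induction l generalizing c u b with
  | nil => simp [runAux]
  | cons p l ih =>
    have hmem := PySem.List.foldl_max_mem (l.map Prod.snd)
    have hle := fun a => PySem.List.le_foldl_max (l.map Prod.snd) a
    by_cases h1 : p.2 > c
    · -- p.2 > c : restart with (p.2, p.1, true)
      have hstep : runAux (p :: l) c u b = runAux l p.2 p.1 true := by
        simp [runAux, h1]
      rw [hstep, ih]
      simp only [List.map_cons, List.foldl_cons, show max c p.2 = p.2 by omega]
      set M := (l.map Prod.snd).foldl max p.2 with hM
      obtain ⟨hMp, -⟩ := hle p.2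
      have hMc : ¬ M = c := by omega
      rw [if_neg hMc, if_neg hMc]
      by_cases hMe : M = p.2
      · rw [if_pos hMe, if_pos hMe]
        have hfind : List.find? (fun q => q.2 == M) (p :: l) = some p :=
          List.find?_cons_of_pos (by simp [hMe])
        have hcnt : List.count M (p.2 :: l.map Prod.snd) = List.count M (l.map Prod.snd) + 1 := by
          simp [hMe]
        rw [hfind]; simp only [hcnt]
        simp only [Option.map_some, Option.getD_some, Prod.mk.injEq, Bool.true_and, hMe]
        refine ⟨trivial, trivial, ?_⟩
        rw [decide_eq_decide]
        constructor <;> omega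
      · rw [if_neg hMe, if_neg hMe]
        have hpM : ¬ ((p.2 == M) = true) := by simp; exact fun h => hMe h.symm
        have hne : (l.find? (fun p' => p'.2 == M)) ≠ none := by
          rcases hmem p.2 with h | h
          · exact absurd h hMe
          · rcases List.mem_map.mp h with ⟨q, hq, hq2⟩
            intro hnone
            have := List.find?_eq_none.mp hnone q hq
            simp [hq2] at this
            exact this hM.symm
        rcases Option.ne_none_iff_exists'.mp hne with ⟨q, hq⟩
        have hcnt : List.count M (p.2 :: l.map Prod.snd) = List.count M (l.map Prod.snd) := by
          simp [List.count_cons]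
          exact fun h => hMe h.symm
        have hfind : List.find? (fun q => q.2 == M) (p :: l) = List.find? (fun q => q.2 == M) l :=
          List.find?_cons_of_neg hpM
        rw [hfind, hq]; simp only [hcnt]
        simp
    · by_cases h2 : p.2 = c
      · -- equal count: uniqueness cleared
        have hstep : runAux (p :: l) c u b = runAux l c u false := by
          simp [runAux, h2]
        rw [hstep, ih]
        simp only [List.map_cons, List.foldl_cons, show max c p.2 = c by omega]
        set M := (l.map Prod.snd).foldl max c with hM
        by_cases hMe : M = c
        · rw [if_pos hMe, if_pos hMe, if_pos hMe, if_pos hMe]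
          have hcnt : List.count c (p.2 :: l.map Prod.snd) = List.count c (l.map Prod.snd) + 1 := by
            simp [h2]
          simp only [hcnt]
          simp
        · rw [if_neg hMe, if_neg hMe, if_neg hMe, if_neg hMe]
          have hpM : ¬ ((p.2 == M) = true) := by
            simp [h2]; exact fun h => hMe h.symm
          have hcnt : List.count M (p.2 :: l.map Prod.snd) = List.count M (l.map Prod.snd) := by
            simp [List.count_cons, h2]
            exact fun h => hMe h.symm
          have hfind : List.find? (fun q => q.2 == M) (p :: l) = List.find? (fun q => q.2 == M) l :=
            List.find?_cons_of_neg hpM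
          rw [hfind]; simp only [hcnt]
      · -- p.2 < c : state unchanged
        have h1' : p.2 < c := by omega
        have hstep : runAux (p :: l) c u b = runAux l c u b := by
          simp [runAux, h2]
          omega
        rw [hstep, ih]
        simp only [List.map_cons, List.foldl_cons, show max c p.2 = c by omega]
        set M := (l.map Prod.snd).foldl max c with hM
        obtain ⟨hMc, -⟩ := hle c
        have hpM : ¬ p.2 = M := by omega
        by_cases hMe : M = c
        · rw [if_pos hMe, if_pos hMe, if_pos hMe, if_pos hMe]
          have hcnt : List.count c (p.2 :: l.map Prod.snd) = List.count c (l.map Prod.snd) := by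
            simp [List.count_cons]
            omega
          simp only [hcnt]
        · rw [if_neg hMe, if_neg hMe, if_neg hMe, if_neg hMe]
          have hpMb : ¬ ((p.2 == M) = true) := by simp [hpM]
          have hcnt : List.count M (p.2 :: l.map Prod.snd) = List.count M (l.map Prod.snd) := by
            simp [hpM]
          have hfind : List.find? (fun q => q.2 == M) (p :: l) = List.find? (fun q => q.2 == M) l :=
            List.find?_cons_of_neg hpMb
          rw [hfind]; simp only [hcnt]

-- (l.filter p).head? = l.find? p
theorem head?_filter {α : Type} (p : α → Bool) (l : List α) :
    (l.filter p).head? = l.find? p := by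
  induction l with
  | nil => rfl
  | cons x l ih =>
    by_cases h : p x <;> simp [h, ih]

-- count of M among the snd-components = number of pairs kept by A's filter
theorem count_snd_eq_length_filter (vs : List (String × Int)) (M : Int) :
    List.count M (vs.map Prod.snd) = (vs.filter (fun p => p.2 == M)).length := by
  induction vs with
  | nil => rfl
  | cons q vs ih =>
    rw [List.map_cons, List.count_cons, List.filter_cons, ih]
    by_cases h : q.2 = M
    · have h1 : (q.2 == M) = true := by simp [h]
      simp [h1]
    · have h1 : (q.2 == M) = false := by simp [h]
      simp [h1]

-- ===== VERDICT (by name: the statement is the Claim_ definition above) =====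
theorem get_leading_vote_spec : Claim_equal_get_leading_vote := by
  intro votes _
  unfold Spec_get_leading_vote
  cases votes with
  | nil => rfl
  | cons v rest =>
    unfold get_leading_vote get_leading_vote_alt
    rw [List.foldl_cons]
    have hb : bStep (none, none, true) v = (some v.2, some v.1, true) := rfl
    rw [hb, foldl_bStep_eq_runAux, runAux_spec]
    simp only [List.map_cons, PySem.List.max?_id_cons]
    set M := (rest.map Prod.snd).foldl max v.2 with hM
    rw [if_neg (by simp : ¬ (v :: rest) = [])]
    by_cases hM0 : M = 0
    · simp [hM0]
    · rw [if_neg hM0]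
      have hlen : (((v :: rest).filter (fun p => p.2 == M)).map Prod.fst).length
          = List.count M (v.2 :: rest.map Prod.snd) := by
        rw [List.length_map, ← count_snd_eq_length_filter, List.map_cons]
      have hhead : (((v :: rest).filter (fun p => p.2 == M)).map Prod.fst).head?
          = ((v :: rest).find? (fun p => p.2 == M)).map Prod.fst := by
        rw [← head?_filter, List.head?_map]
      rw [if_neg hM0]
      have hflag : (if M = v.2 then true && decide (List.count v.2 (rest.map Prod.snd) = 0)
            else decide (List.count M (rest.map Prod.snd) = 1))
          = decide (List.count M (v.2 :: rest.map Prod.snd) = 1) := by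
        by_cases hMv : M = v.2
        · rw [if_pos hMv, Bool.true_and, List.count_cons,
            if_pos (by simp [hMv] : (v.2 == M) = true), ← hMv]
          rw [decide_eq_decide]
          constructor <;> omega
        · rw [if_neg hMv, List.count_cons,
            if_neg (by simp; exact fun h => hMv h.symm : ¬ (v.2 == M) = true)]
          simp
      rw [hflag]
      by_cases hlen1 : List.count M (v.2 :: rest.map Prod.snd) = 1
      · rw [if_pos (by rw [hlen]; exact hlen1), if_pos (by simp [hlen1])]
        obtain ⟨x, hx⟩ := List.length_eq_one_iff.mp (by rw [hlen]; exact hlen1)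
        rw [hx]
        have hget : PySem.List.pyGet? [x] (0 : Int) = some x := rfl
        rw [hget]
        have hhx : some x = Option.map Prod.fst (List.find? (fun p => p.2 == M) (v :: rest)) := by
          rw [← hhead, hx]; rfl
        rw [hhx]
        by_cases hMv : M = v.2
        · rw [List.find?_cons_of_pos (by simp [hMv]), if_pos hMv]
          rfl
        · have hfind : List.find? (fun q => q.2 == M) (v :: rest)
              = List.find? (fun q => q.2 == M) rest :=
            List.find?_cons_of_neg (by simp; exact fun h => hMv h.symm)
          have hpos : 0 < List.count M (rest.map Prod.snd) := by
            rw [List.count_cons,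
              if_neg (by simp; exact fun h => hMv h.symm : ¬ (v.2 == M) = true)] at hlen1
            omega
          obtain ⟨q, hq, hq2⟩ := List.mem_map.mp (List.count_pos_iff.mp hpos)
          have hne : List.find? (fun p' => p'.2 == M) rest ≠ none := by
            intro hnone
            have := List.find?_eq_none.mp hnone q hq
            simp [hq2] at this
          rcases Option.ne_none_iff_exists'.mp hne with ⟨w, hw⟩
          rw [hfind, hw, if_neg hMv]
          rfl
      · rw [if_neg (by rw [hlen]; exact hlen1), if_neg (by simp [hlen1])]
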